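-- pv_equiv track=rewrite | github.com/Han-think/Blueprint_npu | ai/ui/blueprint_batch_ui.py | expand_lines
-- ===== SOURCE A (Python) =====
-- def expand_lines(lines, total, cycle):
--     if not lines: return []
--     if not cycle: return lines[:total]
--     out=[]; i=0
--     while len(out)<total:
--         out.append(lines[i%len(lines)])
--         i+=1
--     return out
-- ===== SOURCE B (Python) =====
-- def expand_lines(lines, total, cycle):
--     if not lines:
--         return []
--     if not cycle:
--         return lines[:total]
--     reps = total // len(lines) + 1
--     return (list(lines) * reps)[:total]
-- ===== Notes on version B (the rewrite author's own statement) =====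
-- stated objective: simpler
-- what changed: Replaces the element-by-element while/append loop with modulo indexing by a closed-form construction: repeat the whole list total//len(lines)+1 times and slice to total.
import Mathlib
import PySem

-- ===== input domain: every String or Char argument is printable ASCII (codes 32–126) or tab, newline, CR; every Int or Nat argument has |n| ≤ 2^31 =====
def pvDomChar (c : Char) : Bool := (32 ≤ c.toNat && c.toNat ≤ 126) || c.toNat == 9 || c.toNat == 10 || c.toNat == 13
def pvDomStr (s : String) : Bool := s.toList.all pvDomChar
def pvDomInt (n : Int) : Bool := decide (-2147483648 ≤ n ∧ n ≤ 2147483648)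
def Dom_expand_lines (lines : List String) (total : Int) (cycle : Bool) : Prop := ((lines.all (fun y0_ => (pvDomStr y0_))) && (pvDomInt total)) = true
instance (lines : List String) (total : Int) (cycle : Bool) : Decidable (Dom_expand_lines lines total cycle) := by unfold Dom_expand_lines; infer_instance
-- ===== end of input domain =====

-- B replaces A's while/append loop (modulo indexing, one element at a time) by a
-- closed-form construction: repeat the whole list total//len+1 times and slice to total.
-- Objective: simpler.

-- ===== PORT A =====
-- A's while loop: out grows by one element per iteration while len(out) < total;
-- i counts iterations (i always stays nonnegative, so Python's i % len(lines) is Nat mod;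
-- the index is always in range, so lines[i%len(lines)] never raises and getD "" is exact).
def expand_lines_loop (lines : List String) (total : Int) (out : List String) (i : Nat) : List String :=
  if _h : (out.length : Int) < total then
    expand_lines_loop lines total (out ++ [lines.getD (i % lines.length) ""]) (i + 1)
  else out
termination_by (total - out.length).toNat
decreasing_by simp; omega

def expand_lines (lines : List String) (total : Int) (cycle : Bool) : List String :=
  if lines = [] then []
  else if !cycle then PySem.List.slice lines none (some total)
  else expand_lines_loop lines total [] 0

-- ===== PORT B =====
def expand_lines_alt (lines : List String) (total : Int) (cycle : Bool) : List String :=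
  if lines = [] then []
  else if !cycle then PySem.List.slice lines none (some total)
  else
    -- reps = total // len(lines) + 1 ; (list(lines) * reps)[:total]
    -- (Python's 'list * k' with k ≤ 0 is the empty list, hence reps.toNat)
    let reps : Int := PySem.Int.floordiv total (lines.length : Int) + 1
    PySem.List.slice (List.flatten (List.replicate reps.toNat lines)) none (some total)

-- ===== PRECONDITION & SPEC =====
def Spec_expand_lines (lines : List String) (total : Int) (cycle : Bool) (out : List String) : Prop := out = expand_lines_alt lines total cycle
instance (lines : List String) (total : Int) (cycle : Bool) (out : List String) : Decidable (Spec_expand_lines lines total cycle out) := by unfold Spec_expand_lines; infer_instance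

-- ===== CLAIM (what is proved, stated in full; the proofs are below) =====
def Claim_equal_expand_lines : Prop := ∀ (lines : List String) (total : Int) (cycle : Bool), Dom_expand_lines lines total cycle → Spec_expand_lines lines total cycle (expand_lines lines total cycle)

-- ===== LEMMAS AND PROOFS =====

-- the pure cyclic sequence lines[i%n], lines[(i+1)%n], … of length m
def cyc (lines : List String) (i m : Nat) : List String :=
  match m with
  | 0 => []
  | m + 1 => lines.getD (i % lines.length) "" :: cyc lines (i + 1) m

theorem cyc_shift (lines : List String) (i m : Nat) :
    cyc lines (i + lines.length) m = cyc lines i m := by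
  induction m generalizing i with
  | zero => rfl
  | succ m ih =>
    simp only [cyc, Nat.add_mod_right]
    rw [show i + lines.length + 1 = (i + 1) + lines.length by omega, ih]

theorem cyc_add (lines : List String) (i m₁ m₂ : Nat) :
    cyc lines i (m₁ + m₂) = cyc lines i m₁ ++ cyc lines (i + m₁) m₂ := by
  induction m₁ generalizing i with
  | zero => simp [cyc]
  | succ m₁ ih =>
    rw [show m₁ + 1 + m₂ = (m₁ + m₂) + 1 by omega]
    simp only [cyc, ih]
    simp
    rw [show i + 1 + m₁ = i + (m₁ + 1) by omega]

theorem cyc_take (lines : List String) (i m : Nat) (h : i + m ≤ lines.length) :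
    cyc lines i m = (lines.drop i).take m := by
  induction m generalizing i with
  | zero => simp [cyc]
  | succ m ih =>
    have hi : i < lines.length := by omega
    simp only [cyc]
    rw [Nat.mod_eq_of_lt hi, ih (i + 1) (by omega)]
    rw [List.getD_eq_getElem?_getD, List.getElem?_eq_getElem hi]
    simp only [Option.getD_some]
    conv_rhs => rw [List.drop_eq_getElem_cons hi, List.take_succ_cons]

theorem take_flatten_replicate (lines : List String) (hne : lines ≠ []) :
    ∀ (r m : Nat), m ≤ r * lines.length →
      (List.flatten (List.replicate r lines)).take m = cyc lines 0 m := by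
  intro r
  induction r with
  | zero =>
    intro m hm
    have hm0 : m = 0 := by omega
    subst hm0; simp [cyc]
  | succ r ih =>
    intro m hm
    have hn : 0 < lines.length := List.length_pos_iff.mpr hne
    rw [List.replicate_succ, List.flatten_cons]
    by_cases hc : m ≤ lines.length
    · rw [List.take_append_of_le_length hc, cyc_take lines 0 m (by omega)]
      simp
    · push_neg at hc
      rw [List.take_append, List.take_of_length_le (by omega),
          show m = lines.length + (m - lines.length) by omega,
          cyc_add lines 0 lines.length (m - lines.length),
          cyc_take lines 0 lines.length (by omega), cyc_shift,
          ← ih (m - lines.length) (by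
            have h := hm
            rw [Nat.add_mul, Nat.one_mul] at h
            omega)]
      simp

theorem loop_eq (lines : List String) (hne : lines ≠ []) (total : Int) :
    ∀ (out : List String) (i : Nat), i = out.length →
      expand_lines_loop lines total out i = out ++ cyc lines i (total - out.length).toNat := by
  intro out i hi
  generalize hfuel : (total - out.length).toNat = fuel
  induction fuel generalizing out i with
  | zero =>
    rw [expand_lines_loop]
    have : ¬ ((out.length : Int) < total) := by omega
    simp [this, cyc]
  | succ fuel ih =>
    rw [expand_lines_loop]
    have hlt : (out.length : Int) < total := by omega
    simp only [hlt, dif_pos]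
    rw [ih (out ++ [lines.getD (i % lines.length) ""]) (i + 1) (by simp [hi]) (by simp; omega)]
    have : (total - out.length).toNat = fuel + 1 := hfuel
    have hc : cyc lines i (fuel + 1) = lines.getD (i % lines.length) "" :: cyc lines (i + 1) fuel := rfl
    rw [← hfuel, this, hc]
    simp

-- ===== VERDICT (by name: the statement is the Claim_ definition above) =====
theorem expand_lines_spec : Claim_equal_expand_lines := by
  intro lines total cycle _
  unfold Spec_expand_lines
  unfold expand_lines expand_lines_alt
  by_cases hne : lines = []
  · simp [hne]
  · rw [if_neg hne, if_neg hne]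
    cases cycle with
    | false => simp
    | true =>
      simp only [Bool.not_true, Bool.false_eq_true, if_false]
      have hn : 0 < lines.length := List.length_pos_iff.mpr hne
      by_cases hpos : 0 ≤ total
      · -- positive (or zero) total
        have hfd : PySem.Int.floordiv total (lines.length : Int) = total.fdiv lines.length := by
          rw [PySem.Int.floordiv_eq_ediv_of_pos (by exact_mod_cast hn)]
          rw [Int.fdiv_eq_ediv_of_nonneg total (Int.natCast_nonneg _)]
        have hreps : total ≤ (PySem.Int.floordiv total (lines.length : Int) + 1) * lines.length := by
          rw [hfd]
          exact (Int.lt_fdiv_add_one_mul_self total (by exact_mod_cast hn)).le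
        rw [PySem.List.slice_to _ hpos]
        rw [take_flatten_replicate lines hne _ total.toNat (by
          have h1 : (0:Int) ≤ PySem.Int.floordiv total (lines.length : Int) + 1 := by
            rw [hfd]; have := Int.fdiv_nonneg hpos (Int.natCast_nonneg lines.length); omega
          have h2 : ((PySem.Int.floordiv total (lines.length : Int) + 1).toNat : Int) = PySem.Int.floordiv total (lines.length : Int) + 1 := Int.toNat_of_nonneg h1
          have : (total.toNat : Int) ≤ ((PySem.Int.floordiv total (lines.length : Int) + 1).toNat * lines.length : Nat) := by
            push_cast [h2]; omega
          exact_mod_cast this)]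
        rw [loop_eq lines hne total [] 0 rfl]
        simp
      · -- total < 0: loop never runs, reps ≤ 0, replicate 0, slice of [] is []
        push_neg at hpos
        rw [expand_lines_loop]
        have h1 : ¬ (((([] : List String)).length : Int) < total) := by simp; omega
        simp only [h1, dif_neg]
        have hrneg : PySem.Int.floordiv total (lines.length : Int) + 1 ≤ 0 := by
          rw [PySem.Int.floordiv_eq_ediv_of_pos (by exact_mod_cast hn)]
          have : total / (lines.length : Int) < 0 := Int.ediv_neg_of_neg_of_pos hpos (by exact_mod_cast hn)
          omega
        rw [Int.toNat_of_nonpos hrneg]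
        simp [PySem.List.slice]
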